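-- pv_equiv track=rewrite | github.com/Noman5237/GoogleCodingCompetitions | CodeJam/2019/Qualification/saving_the_universe_again.py | get_program_stat
-- ===== SOURCE A (Python) =====
-- def get_program_stat(program):
--     """
--     Getting detailed information about robot aliens program
--     @return c           possible hacking position and no of moves required
--     @return no_of_s     How many times robot alien is going to shoot
--
--     """
--
--     modRevProgram = program[::-1]
--     no_of_s = 0
--     c = []
--     for instruction in modRevProgram:
--         if instruction == "S":
--             no_of_s += 1
--         else:
--             c.append(no_of_s)
--     return c[::-1], no_of_s
-- ===== SOURCE B (Python) =====
-- def get_program_stat(program):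
--     """Forward single pass with a precomputed total shot count: for each
--     non-'S' instruction the shots still ahead are total_s - s_seen; no
--     list reversal is needed."""
--     total_s = sum(1 for ch in program if ch == 'S')
--     c = []
--     s_seen = 0
--     for instruction in program:
--         if instruction == 'S':
--             s_seen += 1
--         else:
--             c.append(total_s - s_seen)
--     return c, total_s
-- ===== Notes on version B (the rewrite author's own statement) =====
-- stated objective: alternative
-- what changed: Replaces A's reverse-traverse-accumulate-then-reverse-again with a precomputed total shot count plus one forward pass that appends total_s - s_seen in original order, eliminating both list reversals.
import Mathlib
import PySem

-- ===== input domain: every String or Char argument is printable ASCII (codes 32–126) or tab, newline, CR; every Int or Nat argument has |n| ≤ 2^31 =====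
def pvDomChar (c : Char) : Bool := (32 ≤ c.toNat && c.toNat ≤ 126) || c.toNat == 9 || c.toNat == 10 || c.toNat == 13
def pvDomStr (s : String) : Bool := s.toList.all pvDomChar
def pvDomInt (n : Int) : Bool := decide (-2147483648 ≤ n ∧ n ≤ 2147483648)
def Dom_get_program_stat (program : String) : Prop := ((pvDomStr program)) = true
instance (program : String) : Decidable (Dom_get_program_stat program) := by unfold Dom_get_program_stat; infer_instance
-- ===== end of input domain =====

-- B replaces A's reverse-accumulate-reverse with a precomputed total shot count
-- and a single forward subtraction pass (objective: alternative decomposition).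


-- ===== PORT A =====
-- for instruction in modRevProgram: if 'S' then no_of_s += 1 else c.append(no_of_s)
def aLoop : List Char → Int → List Int → Int × List Int
  | [], no_of_s, c => (no_of_s, c)
  | x :: xs, no_of_s, c =>
      if x == 'S' then aLoop xs (no_of_s + 1) c else aLoop xs no_of_s (c ++ [no_of_s])

def get_program_stat (program : String) : List Int × Int :=
  let modRevProgram := program.toList.reverse      -- program[::-1]
  let (no_of_s, c) := aLoop modRevProgram 0 []
  (c.reverse, no_of_s)                             -- c[::-1], no_of_s

-- ===== PORT B =====
-- for instruction in program: if 'S' then s_seen += 1 else c.append(total_s - s_seen)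
def bLoop : List Char → Int → Int → List Int → List Int
  | [], _, _, c => c
  | x :: xs, total_s, s_seen, c =>
      if x == 'S' then bLoop xs total_s (s_seen + 1) c
      else bLoop xs total_s s_seen (c ++ [total_s - s_seen])

def get_program_stat_alt (program : String) : List Int × Int :=
  let total_s : Int :=
    program.toList.foldl (fun a ch => if ch == 'S' then a + 1 else a) 0  -- sum(1 for ch … if ch == 'S')
  (bLoop program.toList total_s 0 [], total_s)

-- ===== PRECONDITION & SPEC =====
def Spec_get_program_stat (program : String) (out : List Int × Int) : Prop := out = get_program_stat_alt program
instance (program : String) (out : List Int × Int) : Decidable (Spec_get_program_stat program out) := by unfold Spec_get_program_stat; infer_instance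

-- ===== CLAIM (what is proved, stated in full; the proofs are below) =====
def Claim_equal_get_program_stat : Prop := ∀ (program : String), Dom_get_program_stat program → Spec_get_program_stat program (get_program_stat program)

-- ===== LEMMAS AND PROOFS =====

-- abstract view of A's loop output: running-count values at non-'S' positions
def hList : Int → List Char → List Int
  | _, [] => []
  | s, x :: xs => if x == 'S' then hList (s + 1) xs else s :: hList s xs

-- abstract view of B's loop output: "difference" d = total_s - s_seen
def kList : Int → List Char → List Int
  | _, [] => []
  | d, x :: xs => if x == 'S' then kList (d - 1) xs else d :: kList d xs

def cS (l : List Char) : Int := (l.count 'S' : Int)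

theorem aLoop_eq (l : List Char) : ∀ (s : Int) (c : List Int),
    aLoop l s c = (s + cS l, c ++ hList s l) := by
  induction l with
  | nil => intro s c; simp [aLoop, hList, cS]
  | cons x xs ih =>
      intro s c
      by_cases hx : x = 'S' <;>
        simp [aLoop, hList, cS, hx, ih, add_comm, add_left_comm]

theorem bLoop_eq (l : List Char) : ∀ (t s : Int) (c : List Int),
    bLoop l t s c = c ++ kList (t - s) l := by
  induction l with
  | nil => intro t s c; simp [bLoop, kList]
  | cons x xs ih =>
      intro t s c
      by_cases hx : x = 'S'
      · simp [bLoop, kList, hx, ih]; ring_nf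
      · simp [bLoop, kList, hx, ih]

theorem hList_append (a b : List Char) : ∀ s,
    hList s (a ++ b) = hList s a ++ hList (s + cS a) b := by
  induction a with
  | nil => intro s; simp [hList, cS]
  | cons x xs ih =>
      intro s
      by_cases hx : x = 'S' <;>
        simp [hList, hx, ih, cS, add_comm, add_left_comm]

theorem cS_reverse (l : List Char) : cS l.reverse = cS l := by
  simp [cS]

-- the key bridge: A's reversed-run values, reversed back, are B's forward differences
theorem hList_reverse_eq_kList (l : List Char) : ∀ s,
    (hList s l.reverse).reverse = kList (s + cS l) l := by
  induction l with
  | nil => intro s; simp [hList, kList]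
  | cons x xs ih =>
      intro s
      have : (x :: xs).reverse = xs.reverse ++ [x] := by simp
      rw [this, hList_append, cS_reverse]
      by_cases hx : x = 'S'
      · simp [hList, hx, kList, cS, ih]
        congr 1
        ring
      · simp [hList, hx, kList, ih, cS]

theorem foldl_count (l : List Char) :
    l.foldl (fun a ch => if ch == 'S' then a + 1 else a) 0 = cS l := by
  simpa [cS] using PySem.List.foldl_beq_add_one (l := l) (v := 'S') (a := (0 : Int))

-- ===== VERDICT (by name: the statement is the Claim_ definition above) =====
theorem get_program_stat_spec : Claim_equal_get_program_stat := by
  intro program _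
  unfold Spec_get_program_stat
  simp only [get_program_stat, get_program_stat_alt, aLoop_eq, bLoop_eq, foldl_count, Prod.mk.injEq]
  refine ⟨?_, ?_⟩
  · simpa using hList_reverse_eq_kList program.toList 0
  · simp [cS_reverse]
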